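-- pv_equiv track=rewrite | github.com/pyiron/executorlib | pympipool/shared/backend.py | _update_default_dict_from_arguments
-- ===== SOURCE A (Python) =====
-- def _update_default_dict_from_arguments(argument_lst, argument_dict, default_dict):
--     default_dict.update(
--         {
--             k: argument_lst[argument_lst.index(v) + 1]
--             for k, v in argument_dict.items()
--             if v in argument_lst
--         }
--     )
--     return default_dict
-- ===== SOURCE B (Python) =====
-- def _update_default_dict_from_arguments(argument_lst, argument_dict, default_dict):
--     # Invert the query dict (value -> list of keys asking for it), then resolve
--     # all queries in ONE sweep over argument_lst: at the first occurrence of a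
--     # value, the element right after it answers every key that asked for it.
--     pending = {}
--     for k, v in argument_dict.items():
--         pending.setdefault(v, []).append(k)
--     resolved = {}
--     seen = set()
--     for prev, nxt in zip(argument_lst, argument_lst[1:]):
--         if prev not in seen:
--             seen.add(prev)
--             for k in pending.get(prev, ()):
--                 resolved[k] = nxt
--     for k in argument_dict:
--         if k in resolved:
--             default_dict[k] = resolved[k]
--     return default_dict
-- ===== Notes on version B (the rewrite author's own statement) =====
-- stated objective: faster
-- what changed: B inverts argument_dict into a value->keys multimap and then resolves all lookups offline in a single sweep over argument_lst (the element after a value's first occurrence answers every key that asked for that value), instead of A's per-entry 'v in argument_lst' membership test plus argument_lst.index(v) rescan; Pre_ excludes the inputs where A's index(v)+1 lookup raises IndexError.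
import Mathlib
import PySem

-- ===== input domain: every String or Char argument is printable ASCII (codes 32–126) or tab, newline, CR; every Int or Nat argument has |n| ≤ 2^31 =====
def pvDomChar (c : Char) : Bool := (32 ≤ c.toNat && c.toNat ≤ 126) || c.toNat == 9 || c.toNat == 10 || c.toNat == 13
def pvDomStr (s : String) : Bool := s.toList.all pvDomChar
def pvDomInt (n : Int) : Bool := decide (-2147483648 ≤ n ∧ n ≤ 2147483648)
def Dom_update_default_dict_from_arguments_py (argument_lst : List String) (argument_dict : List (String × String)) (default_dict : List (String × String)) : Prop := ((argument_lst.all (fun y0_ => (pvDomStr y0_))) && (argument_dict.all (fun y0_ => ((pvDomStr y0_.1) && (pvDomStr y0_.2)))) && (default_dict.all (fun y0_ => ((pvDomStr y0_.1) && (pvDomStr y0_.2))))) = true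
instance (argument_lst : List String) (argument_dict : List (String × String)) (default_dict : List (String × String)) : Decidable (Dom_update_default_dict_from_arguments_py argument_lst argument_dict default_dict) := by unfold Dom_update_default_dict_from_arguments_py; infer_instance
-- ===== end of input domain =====

-- B inverts argument_dict into a value→keys multimap and resolves every lookup in one sweep over
-- argument_lst, instead of A's per-entry membership test + index() rescan.
-- Both Pythons mutate default_dict in place; the equivalence proved here is about the return value.

-- ===== PORT A =====
-- default_dict.update({k: argument_lst[argument_lst.index(v) + 1] for k, v in argument_dict.items() if v in argument_lst})
-- argument_lst[argument_lst.index(v) + 1] can raise IndexError; Pre_ excludes that, '.getD ""' totalizes the port there.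
def update_default_dict_from_arguments_py (argument_lst : List String) (argument_dict : List (String × String)) (default_dict : List (String × String)) : List (String × String) :=
  let upd : PySem.Dict String String :=
    (PySem.Dict.ofList argument_dict).items.foldl
      (fun t p =>
        if p.2 ∈ argument_lst then
          t.insert p.1 ((PySem.List.pyGet? argument_lst
            (((PySem.List.index? argument_lst p.2).getD 0 : Int) + 1)).getD "")
        else t)
      PySem.Dict.empty
  ((PySem.Dict.ofList default_dict).update upd.items).items

-- ===== PORT B =====
-- pending = {}; for k, v in argument_dict.items(): pending.setdefault(v, []).append(k)
def pendingMap (items : List (String × String)) : PySem.Dict String (List String) :=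
  items.foldl (fun m p => m.modify p.2 [] (· ++ [p.1])) PySem.Dict.empty

-- resolved = {}; seen = set()
-- for prev, nxt in zip(argument_lst, argument_lst[1:]):
--     if prev not in seen: seen.add(prev); for k in pending.get(prev, ()): resolved[k] = nxt
def sweepResolved (argument_lst : List String) (pending : PySem.Dict String (List String)) : PySem.Dict String String :=
  ((argument_lst.zip (argument_lst.drop 1)).foldl
    (fun (st : PySem.Set String × PySem.Dict String String) pr =>
      if pr.1 ∈ st.1 then st
      else (st.1.add pr.1, (pending.getD pr.1 []).foldl (fun r k => r.insert k pr.2) st.2))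
    (PySem.Set.ofList [], PySem.Dict.empty)).2

-- for k in argument_dict: if k in resolved: default_dict[k] = resolved[k]
def update_default_dict_from_arguments_py_alt (argument_lst : List String) (argument_dict : List (String × String)) (default_dict : List (String × String)) : List (String × String) :=
  let items := (PySem.Dict.ofList argument_dict).items
  let resolved := sweepResolved argument_lst (pendingMap items)
  (items.foldl
    (fun d p =>
      match resolved.get? p.1 with
      | some x => d.insert p.1 x
      | none => d)
    (PySem.Dict.ofList default_dict)).items

-- ===== PRECONDITION & SPEC =====
-- Pre_ excludes exactly the inputs on which A raises IndexError: some value v of argument_dict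
-- whose first occurrence in argument_lst is its last element (index(v)+1 == len). (Stated over all
-- pairs of the association list; argument_dict models a Python dict, whose keys are unique, so no
-- pair is shadowed and this is exactly A's raising condition.)
def Pre_update_default_dict_from_arguments_py (argument_lst : List String) (argument_dict : List (String × String)) (default_dict : List (String × String)) : Prop :=
  ∀ p ∈ argument_dict,
    p.2 ∈ argument_lst → List.idxOf p.2 argument_lst + 1 ≠ argument_lst.length
instance (argument_lst : List String) (argument_dict : List (String × String)) (default_dict : List (String × String)) : Decidable (Pre_update_default_dict_from_arguments_py argument_lst argument_dict default_dict) := by unfold Pre_update_default_dict_from_arguments_py; infer_instance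

def pvWitness_update_default_dict_from_arguments_py : List String × (List (String × String)) × (List (String × String)) :=
  (["a", "b"], [("k", "a")], [("x", "y")])

def Spec_update_default_dict_from_arguments_py (argument_lst : List String) (argument_dict : List (String × String)) (default_dict : List (String × String)) (out : List (String × String)) : Prop := out = update_default_dict_from_arguments_py_alt argument_lst argument_dict default_dict
instance (argument_lst : List String) (argument_dict : List (String × String)) (default_dict : List (String × String)) (out : List (String × String)) : Decidable (Spec_update_default_dict_from_arguments_py argument_lst argument_dict default_dict out) := by unfold Spec_update_default_dict_from_arguments_py; infer_instance

-- ===== CLAIM (what is proved, stated in full; the proofs are below) =====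
def Claim_equal_update_default_dict_from_arguments_py : Prop := ∀ (argument_lst : List String) (argument_dict : List (String × String)) (default_dict : List (String × String)), Dom_update_default_dict_from_arguments_py argument_lst argument_dict default_dict → Pre_update_default_dict_from_arguments_py argument_lst argument_dict default_dict → Spec_update_default_dict_from_arguments_py argument_lst argument_dict default_dict (update_default_dict_from_arguments_py argument_lst argument_dict default_dict)

-- ===== LEMMAS AND PROOFS =====

lemma dictEq_of_items {d e : PySem.Dict String String} (h : d.items = e.items) : d = e := by
  cases d; cases e; simpa using h

lemma not_key_of_not_contains {e : PySem.Dict String String} {k : String}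
    (h : e.contains k = false) : ∀ p ∈ e.items, p.1 ≠ k := by
  intro p hp
  simp only [PySem.Dict.contains, List.any_eq_false] at h
  simpa using h p hp

lemma map_repl_eq_self {l : List (String × String)} {k x : String}
    (h : ∀ p ∈ l, p.1 ≠ k) :
    l.map (fun p => if (p.1 == k) = true then (k, x) else p) = l := by
  induction l with
  | nil => rfl
  | cons p t ih =>
    simp only [List.map_cons]
    rw [if_neg (by simpa using h p (List.mem_cons_self ..)),
        ih (fun q hq => h q (List.mem_cons_of_mem _ hq))]

lemma insert_comm' {m : PySem.Dict String String} {k k' x v' : String}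
    (hk : m.contains k = true) (hne : k' ≠ k) :
    (m.insert k' v').insert k x = (m.insert k x).insert k' v' := by
  apply dictEq_of_items
  by_cases hk' : m.contains k' = true
  · have h1 : (m.insert k' v').contains k = true := by
      rw [PySem.Dict.contains_insert]; simp [hk]
    have h2 : (m.insert k x).contains k' = true := by
      rw [PySem.Dict.contains_insert]; simp [hk']
    rw [PySem.Dict.items_insert_of_contains _ _ h1, PySem.Dict.items_insert_of_contains _ _ hk',
        PySem.Dict.items_insert_of_contains _ _ h2, PySem.Dict.items_insert_of_contains _ _ hk]
    simp only [List.map_map]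
    refine List.map_congr_left (fun p _ => ?_)
    by_cases ha : p.1 = k' <;> by_cases hb : p.1 = k <;>
      simp [Function.comp, ha, hb, hne, Ne.symm hne]
  · have hk'f : m.contains k' = false := by simpa using hk'
    have h1 : (m.insert k' v').contains k = true := by
      rw [PySem.Dict.contains_insert]; simp [hk]
    have h2 : (m.insert k x).contains k' = false := by
      rw [PySem.Dict.contains_insert]
      simp [hk'f, hne]
    rw [PySem.Dict.items_insert_of_contains _ _ h1, PySem.Dict.items_insert_of_not_contains _ _ hk'f,
        PySem.Dict.items_insert_of_not_contains _ _ h2, PySem.Dict.items_insert_of_contains _ _ hk]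
    rw [List.map_append]
    simp [hne]

lemma insert_insert_self (e : PySem.Dict String String) (k w x : String) :
    (e.insert k w).insert k x = e.insert k x := by
  apply dictEq_of_items
  have h1 : (e.insert k w).contains k = true := by
    rw [PySem.Dict.contains_insert]; simp
  by_cases he : e.contains k = true
  · rw [PySem.Dict.items_insert_of_contains _ _ h1, PySem.Dict.items_insert_of_contains _ _ he,
        PySem.Dict.items_insert_of_contains _ _ he]
    simp only [List.map_map]
    refine List.map_congr_left (fun p _ => ?_)
    by_cases hb : p.1 = k <;> simp [Function.comp, hb]
  · have hef : e.contains k = false := by simpa using he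
    rw [PySem.Dict.items_insert_of_contains _ _ h1, PySem.Dict.items_insert_of_not_contains _ _ hef,
        PySem.Dict.items_insert_of_not_contains _ _ hef]
    rw [List.map_append]
    rw [map_repl_eq_self (not_key_of_not_contains hef)]
    simp

lemma update_insert_comm (l : List (String × String)) :
    ∀ (m : PySem.Dict String String) (k x : String), m.contains k = true → (∀ p ∈ l, p.1 ≠ k) →
    (PySem.Dict.update m l).insert k x = PySem.Dict.update (m.insert k x) l := by
  induction l with
  | nil => intro m k x _ _; rfl
  | cons p t ih =>
    intro m k x hk hl
    simp only [PySem.Dict.update, List.foldl_cons] at *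
    rw [ih (m.insert p.1 p.2) k x
          (by rw [PySem.Dict.contains_insert]; simp [hk])
          (fun q hq => hl q (List.mem_cons_of_mem _ hq)),
        insert_comm' hk (hl p (List.mem_cons_self ..))]

lemma update_map_repl (k x : String) : ∀ (l : List (String × String)) (D : PySem.Dict String String),
    (l.map (fun q => q.1)).Nodup → (∃ p ∈ l, p.1 = k) →
    PySem.Dict.update D (l.map (fun p => if (p.1 == k) = true then (k, x) else p))
      = (PySem.Dict.update D l).insert k x := by
  intro l
  induction l with
  | nil => intro D _ hex; simp at hex
  | cons p t ih =>
    intro D hnd hex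
    simp only [List.map_cons] at hnd
    by_cases hp : p.1 = k
    · have htk : ∀ q ∈ t, q.1 ≠ k := by
        intro q hq hqk
        have hnotin : p.1 ∉ t.map (fun q => q.1) := (List.nodup_cons.1 hnd).1
        exact hnotin (by rw [hp, ← hqk]; exact List.mem_map_of_mem hq)
      have hhead : (fun p : String × String => if (p.1 == k) = true then (k, x) else p) p
          = (k, x) := by simp [hp]
      simp only [List.map_cons, hhead]
      rw [map_repl_eq_self htk]
      simp only [PySem.Dict.update, List.foldl_cons]
      have hcm := update_insert_comm t (D.insert p.1 p.2) k x
          (by rw [PySem.Dict.contains_insert]; simp [hp]) htk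
      simp only [PySem.Dict.update] at hcm
      rw [hcm, hp, insert_insert_self]
    · have hex' : ∃ q ∈ t, q.1 = k := by
        rcases hex with ⟨q, hq, hqk⟩
        rcases List.mem_cons.1 hq with rfl | hq'
        · exact absurd hqk hp
        · exact ⟨q, hq', hqk⟩
      have hhead : (fun q : String × String => if (q.1 == k) = true then (k, x) else q) p
          = p := by simp [hp]
      simp only [List.map_cons, hhead]
      simp only [PySem.Dict.update, List.foldl_cons]
      have hr := ih (D.insert p.1 p.2) (List.nodup_cons.1 hnd).2 hex'
      simp only [PySem.Dict.update] at hr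
      exact hr

lemma update_items_insert (D t : PySem.Dict String String) (k x : String) (hnd : t.keys.Nodup) :
    PySem.Dict.update D ((t.insert k x).items) = (PySem.Dict.update D t.items).insert k x := by
  by_cases hc : t.contains k = true
  · rw [PySem.Dict.items_insert_of_contains _ _ hc]
    refine update_map_repl k x t.items D (by simpa [PySem.Dict.keys] using hnd) ?_
    simp only [PySem.Dict.contains, List.any_eq_true] at hc
    rcases hc with ⟨p, hp, hpk⟩
    exact ⟨p, hp, by simpa using hpk⟩
  · rw [PySem.Dict.items_insert_of_not_contains _ _ (by simpa using hc)]
    simp [PySem.Dict.update, List.foldl_append]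

lemma tmp_nodup (g : String × String → Option String) :
    ∀ (ps : List (String × String)) (t : PySem.Dict String String), t.keys.Nodup →
    (ps.foldl (fun t p => match g p with | some x => t.insert p.1 x | none => t) t).keys.Nodup := by
  intro ps
  induction ps with
  | nil => intro t h; exact h
  | cons p rest ih =>
    intro t h
    simp only [List.foldl_cons]
    cases hg : g p with
    | some x => exact ih _ (PySem.Dict.nodup_keys_insert _ _ _ h)
    | none => exact ih _ h

lemma main_fold (g : String × String → Option String) (ps : List (String × String)) :
    ∀ D : PySem.Dict String String,
    PySem.Dict.update D ((ps.foldl (fun t p => match g p with | some x => t.insert p.1 x | none => t) PySem.Dict.empty).items)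
      = ps.foldl (fun d p => match g p with | some x => d.insert p.1 x | none => d) D := by
  induction ps using List.reverseRecOn with
  | nil => intro D; rfl
  | append_singleton ps p ih =>
    intro D
    rw [List.foldl_append, List.foldl_append]
    simp only [List.foldl_cons, List.foldl_nil]
    cases hg : g p with
    | none => exact ih D
    | some x =>
      rw [update_items_insert _ _ _ _
            (tmp_nodup g ps PySem.Dict.empty PySem.Dict.nodup_keys_empty), ih D]

lemma zip_find? (lst : List String) (v : String) :
    ((lst.zip (lst.drop 1)).find? (fun p => p.1 == v)).map Prod.snd
      = if v ∈ lst then PySem.List.pyGet? lst ((List.idxOf v lst : Int) + 1) else none := by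
  have hone : ((0 : Nat) : Int) + 1 = ((1 : Nat) : Int) := by norm_num
  induction lst with
  | nil => simp
  | cons a rest ih =>
    cases rest with
    | nil =>
      by_cases hv : v = a
      · subst hv
        simp only [List.drop_succ_cons, List.drop_nil, List.zip_nil_right, List.find?_nil,
          Option.map_none]
        rw [if_pos (List.mem_cons_self ..), List.idxOf_cons_self, hone,
          PySem.List.pyGet?_natCast]
        rfl
      · simp [hv]
    | cons b rest' =>
      simp only [List.drop_succ_cons, List.drop_zero, List.zip_cons_cons]
      by_cases hv : a = v
      · subst hv
        rw [List.find?_cons_of_pos (by simp)]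
        rw [if_pos (List.mem_cons_self ..), List.idxOf_cons_self, hone,
          PySem.List.pyGet?_natCast]
        rfl
      · rw [List.find?_cons_of_neg (by simpa using hv)]
        have ihb := ih
        simp only [List.drop_succ_cons, List.drop_zero] at ihb
        rw [ihb]
        by_cases hm : v ∈ b :: rest'
        · have hmem : v ∈ a :: b :: rest' := List.mem_cons_of_mem _ hm
          rw [if_pos hm, if_pos hmem, List.idxOf_cons_ne _ hv]
          have hcast : (((List.idxOf v (b :: rest')).succ : Nat) : Int) + 1
              = (((List.idxOf v (b :: rest') + 1 + 1 : Nat)) : Int) := by push_cast; ring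
          have hcast2 : ((List.idxOf v (b :: rest') : Nat) : Int) + 1
              = (((List.idxOf v (b :: rest') + 1 : Nat)) : Int) := by push_cast; ring
          rw [hcast, hcast2, PySem.List.pyGet?_natCast, PySem.List.pyGet?_natCast]
          simp
        · have hmem : v ∉ a :: b :: rest' := by
            intro h
            rcases List.mem_cons.1 h with h' | h'
            · exact hv h'.symm
            · exact hm h'
          rw [if_neg hm, if_neg hmem]

lemma index?_eq_some_idxOf {lst : List String} {v : String} (h : v ∈ lst) :
    PySem.List.index? lst v = some (List.idxOf v lst) := by
  unfold PySem.List.index?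
  cases hi : List.idxOf? v lst with
  | none => exact absurd (List.idxOf?_eq_none_iff.1 hi) (by simpa using h)
  | some i => rw [List.idxOf_eq_getD_idxOf?, hi]; rfl

-- two items entries with the same key have the same value
lemma key_unique {items : List (String × String)} (hnd : (items.map Prod.fst).Nodup)
    {a b c : String} (h1 : (a, b) ∈ items) (h2 : (a, c) ∈ items) : b = c := by
  induction items with
  | nil => cases h1
  | cons q t ih =>
    simp only [List.map_cons, List.nodup_cons] at hnd
    rcases List.mem_cons.1 h1 with rfl | h1' <;> rcases List.mem_cons.1 h2 with h2' | h2'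
    · exact (congrArg Prod.snd h2').symm
    · exact absurd (List.mem_map_of_mem (f := Prod.fst) h2') (by simpa using hnd.1)
    · exact absurd (List.mem_map_of_mem (f := Prod.fst) h1') (by rw [← h2'] at hnd; simpa using hnd.1)
    · exact ih hnd.2 h1' h2'

-- membership in the inverted multimap = membership in the items list
lemma mem_pending (items : List (String × String)) (k w : String) :
    k ∈ (pendingMap items).getD w [] ↔ (k, w) ∈ items := by
  unfold pendingMap
  have hmap : items.foldl (fun m p => m.modify p.2 [] (· ++ [p.1]))
        (PySem.Dict.empty : PySem.Dict String (List String))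
      = (items.map Prod.swap).foldl (fun m p => m.modify p.1 [] (· ++ [p.2])) PySem.Dict.empty := by
    rw [List.foldl_map]; rfl
  rw [hmap, PySem.Dict.getD_foldl_modify_append, PySem.Dict.getD_empty]
  simp only [List.nil_append, List.mem_map, List.mem_filter, List.mem_map]
  constructor
  · rintro ⟨q, ⟨⟨p, hp, rfl⟩, hq1⟩, hq2⟩
    obtain ⟨a, b⟩ := p
    simp only [Prod.swap_prod_mk] at hq1 hq2
    have hb : b = w := by simpa using hq1
    subst hq2; subst hb; exact hp
  · intro hkw
    exact ⟨(w, k), ⟨⟨(k, w), hkw, rfl⟩, by simp⟩, rfl⟩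

-- folding constant-value inserts over a key list
lemma fold_insert_const (ks : List String) (b : String) :
    ∀ (R : PySem.Dict String String) (k : String),
    (ks.foldl (fun r k' => r.insert k' b) R).get? k = if k ∈ ks then some b else R.get? k := by
  induction ks with
  | nil => intro R k; simp
  | cons k' t ih =>
    intro R k
    simp only [List.foldl_cons]
    rw [ih]
    by_cases ht : k ∈ t
    · simp [ht]
    · by_cases hk : k = k'
      · subst hk; simp [ht, PySem.Dict.get?_insert_self]
      · simp [ht, hk, PySem.Dict.get?_insert_of_ne _ _ hk]

-- once v has been seen, the sweep never touches k again
lemma sweep_untouched (P : PySem.Dict String (List String)) (k v : String)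
    (Hk : ∀ w, k ∈ P.getD w [] ↔ w = v) :
    ∀ (zs : List (String × String)) (seen : PySem.Set String) (R : PySem.Dict String String),
    v ∈ seen →
    ((zs.foldl
      (fun (st : PySem.Set String × PySem.Dict String String) pr =>
        if pr.1 ∈ st.1 then st
        else (st.1.add pr.1, (P.getD pr.1 []).foldl (fun r k => r.insert k pr.2) st.2))
      (seen, R)).2).get? k = R.get? k := by
  intro zs
  induction zs with
  | nil => intro seen R _; rfl
  | cons pr t ih =>
    intro seen R hv
    simp only [List.foldl_cons]
    by_cases hmem : pr.1 ∈ seen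
    · rw [if_pos hmem]; exact ih seen R hv
    · rw [if_neg hmem]
      have hne : pr.1 ≠ v := fun h => hmem (h ▸ hv)
      have hk : k ∉ P.getD pr.1 [] := fun h => hne ((Hk pr.1).1 h)
      rw [ih _ _ ((PySem.Set.mem_add ..).2 (Or.inl hv)), fold_insert_const]
      simp [hk]

-- the sweep resolves k to the element after the first occurrence of v
lemma sweep_find (P : PySem.Dict String (List String)) (k v : String)
    (Hk : ∀ w, k ∈ P.getD w [] ↔ w = v) :
    ∀ (zs : List (String × String)) (seen : PySem.Set String) (R : PySem.Dict String String),
    v ∉ seen → R.get? k = none →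
    ((zs.foldl
      (fun (st : PySem.Set String × PySem.Dict String String) pr =>
        if pr.1 ∈ st.1 then st
        else (st.1.add pr.1, (P.getD pr.1 []).foldl (fun r k => r.insert k pr.2) st.2))
      (seen, R)).2).get? k = (zs.find? (fun p => p.1 == v)).map Prod.snd := by
  intro zs
  induction zs with
  | nil => intro seen R _ hR; simpa using hR
  | cons pr t ih =>
    intro seen R hv hR
    simp only [List.foldl_cons]
    by_cases hmem : pr.1 ∈ seen
    · have hne : pr.1 ≠ v := fun h => hv (h ▸ hmem)
      rw [if_pos hmem, List.find?_cons_of_neg (by simpa using hne)]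
      exact ih seen R hv hR
    · rw [if_neg hmem]
      by_cases heq : pr.1 = v
      · have hk : k ∈ P.getD pr.1 [] := (Hk pr.1).2 heq
        rw [sweep_untouched P k v Hk t _ _ ((PySem.Set.mem_add ..).2 (Or.inr heq.symm)),
            fold_insert_const, if_pos hk, List.find?_cons_of_pos (by simpa using heq)]
        rfl
      · have hv' : v ∉ seen.add pr.1 := by
          intro h
          rcases (PySem.Set.mem_add ..).1 h with h' | h'
          · exact hv h'
          · exact heq h'.symm
        have hk : k ∉ P.getD pr.1 [] := fun h => heq ((Hk pr.1).1 h)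
        rw [List.find?_cons_of_neg (by simpa using fun h => heq h),
            ih _ _ hv' (by rw [fold_insert_const]; simp [hk, hR])]

-- the resolved dict answers each items entry with A's successor value
lemma resolved_get? (lst : List String) (items : List (String × String))
    (hnd : (items.map Prod.fst).Nodup) {p : String × String} (hp : p ∈ items) :
    (sweepResolved lst (pendingMap items)).get? p.1
      = if p.2 ∈ lst then PySem.List.pyGet? lst ((List.idxOf p.2 lst : Int) + 1) else none := by
  have hp' : (p.1, p.2) ∈ items := by simpa using hp
  have Hk : ∀ w, p.1 ∈ (pendingMap items).getD w [] ↔ w = p.2 := by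
    intro w
    rw [mem_pending]
    exact ⟨fun hw => key_unique hnd hw hp', fun hw => hw ▸ hp'⟩
  unfold sweepResolved
  rw [sweep_find (pendingMap items) p.1 p.2 Hk _ _ _ (by simp) (PySem.Dict.get?_empty p.1),
      zip_find?]

-- A's per-entry step value, under Pre_
lemma stepval_eq (lst : List String) (v : String)
    (hpre : v ∈ lst → List.idxOf v lst + 1 ≠ lst.length) :
    (if v ∈ lst then
        some ((PySem.List.pyGet? lst (((PySem.List.index? lst v).getD 0 : Int) + 1)).getD "")
      else none)
      = if v ∈ lst then PySem.List.pyGet? lst ((List.idxOf v lst : Int) + 1) else none := by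
  by_cases h : v ∈ lst
  · simp only [if_pos h]
    rw [index?_eq_some_idxOf h]
    have hlt : List.idxOf v lst + 1 < lst.length :=
      Nat.lt_of_le_of_ne (List.idxOf_lt_length_of_mem h) (hpre h)
    have hg : PySem.List.pyGet? lst ((List.idxOf v lst : Int) + 1)
        = some (lst[List.idxOf v lst + 1]'hlt) := by
      have hcast : ((List.idxOf v lst : Nat) : Int) + 1 = ((List.idxOf v lst + 1 : Nat) : Int) := by
        push_cast; ring
      rw [hcast, PySem.List.pyGet?_natCast, List.getElem?_eq_getElem hlt]
    simp [hg]
  · simp [h]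

-- every pair the dict view keeps is a pair of the original association list
lemma mem_items_foldl_insert : ∀ (l : List (String × String)) (d : PySem.Dict String String) (p : String × String), p ∈ (l.foldl (fun d q => d.insert q.1 q.2) d).items → p ∈ d.items ∨ p ∈ l := by
  intro l
  induction l with
  | nil => intro d p h; exact Or.inl h
  | cons q t ih =>
    intro d p h
    rcases ih (d.insert q.1 q.2) p (by simpa using h) with h' | h'
    · rcases (PySem.Dict.mem_items_insert ..).1 h' with rfl | ⟨hd, _⟩
      · exact Or.inr (by rw [Prod.mk.eta]; exact List.mem_cons_self ..)
      · exact Or.inl hd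
    · exact Or.inr (List.mem_cons_of_mem _ h')

lemma mem_items_ofList {l : List (String × String)} {p : String × String}
    (hp : p ∈ (PySem.Dict.ofList l).items) : p ∈ l := by
  rcases mem_items_foldl_insert l PySem.Dict.empty p hp with h | h
  · simp [PySem.Dict.empty] at h
  · exact h

-- ===== VERDICT (by name: the statement is the Claim_ definition above) =====
theorem update_default_dict_from_arguments_py_spec : Claim_equal_update_default_dict_from_arguments_py := by
  intro argument_lst argument_dict default_dict _ hPre
  unfold Spec_update_default_dict_from_arguments_py
  unfold update_default_dict_from_arguments_py update_default_dict_from_arguments_py_alt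
  refine congrArg PySem.Dict.items ?_
  have hnd : ((PySem.Dict.ofList argument_dict).items.map Prod.fst).Nodup := by
    have := PySem.Dict.nodup_keys_ofList (ps := argument_dict) (κ := String) (ν := String)
    simpa [PySem.Dict.keys] using this
  have hfold :
      (PySem.Dict.ofList argument_dict).items.foldl
        (fun t p =>
          if p.2 ∈ argument_lst then
            t.insert p.1 ((PySem.List.pyGet? argument_lst
              (((PySem.List.index? argument_lst p.2).getD 0 : Int) + 1)).getD "")
          else t)
        PySem.Dict.empty
      = (PySem.Dict.ofList argument_dict).items.foldl
        (fun t p =>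
          match (sweepResolved argument_lst (pendingMap (PySem.Dict.ofList argument_dict).items)).get? p.1 with
          | some x => t.insert p.1 x
          | none => t)
        PySem.Dict.empty := by
    refine PySem.List.foldl_congr_mem _ _ _ _ (fun t p hp => ?_)
    rw [resolved_get? argument_lst _ hnd hp,
        ← stepval_eq argument_lst p.2 (hPre p (mem_items_ofList hp))]
    by_cases h : p.2 ∈ argument_lst <;> simp [h]
  rw [hfold]
  exact main_fold
    (fun p => (sweepResolved argument_lst (pendingMap (PySem.Dict.ofList argument_dict).items)).get? p.1)
    (PySem.Dict.ofList argument_dict).items (PySem.Dict.ofList default_dict)
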